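-- pv_equiv track=rewrite | github.com/pirayan20/2110101_Com_Prog | Grader/07/07_StrFile_★★★_Password_Strength.py | letter_sequence
-- ===== SOURCE A (Python) =====
-- import string
--
-- def letter_sequence(t):
--     y = t.lower()
--     alphabet = string.ascii_lowercase + "abcd"
--     for i in range(len(y)-3):
--         for j in range(len(alphabet)-3):
--             if y[i:i+4] == alphabet[j:j+4]:
--                 return True
--                 break
--     convert = alphabet[::-1]
--     for i in range(len(y)-3):
--         for j in range(len(convert)-3):
--             if y[i:i+4] == convert[j:j+4]:
--                 return True
--                 break
--     return False
-- ===== SOURCE B (Python) =====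
-- def letter_sequence(t):
--     y = t.lower()
--     for i in range(len(y) - 3):
--         w = y[i:i+4]
--         if all('a' <= c <= 'z' for c in w):
--             steps = [(ord(b) - ord(a)) % 26 for a, b in zip(w, w[1:])]
--             if steps == [1, 1, 1] or steps == [25, 25, 25]:
--                 return True
--     return False
-- ===== Notes on version B (the rewrite author's own statement) =====
-- stated objective: simpler
-- what changed: B tests each 4-char window arithmetically (all lowercase letters and consecutive ord-differences all 1 mod 26 or all 25 mod 26) in one pass, instead of A's two passes that compare every window against every window of a built alphabet table and its reversal.
import Mathlib
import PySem

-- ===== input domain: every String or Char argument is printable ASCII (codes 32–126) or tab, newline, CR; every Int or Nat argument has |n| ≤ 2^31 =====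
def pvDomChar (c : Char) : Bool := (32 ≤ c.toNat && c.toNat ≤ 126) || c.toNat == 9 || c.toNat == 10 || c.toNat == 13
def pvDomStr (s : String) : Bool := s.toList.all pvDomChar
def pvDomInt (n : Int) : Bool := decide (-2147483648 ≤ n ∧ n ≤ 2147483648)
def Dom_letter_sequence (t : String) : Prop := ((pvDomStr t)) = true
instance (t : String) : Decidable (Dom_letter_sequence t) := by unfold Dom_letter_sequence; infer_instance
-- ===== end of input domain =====

-- B replaces A's two table-scanning passes (every window of the string compared against every
-- window of a built alphabet table and then of its reversal) by one pass that tests each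
-- window arithmetically; objective: simpler.

-- ===== PORT A =====
-- string.ascii_lowercase + "abcd"
def pvAlphabet : List Char := "abcdefghijklmnopqrstuvwxyz".toList ++ "abcd".toList
-- alphabet[::-1]; the step -1 is nonzero, so slice? never returns none
def pvConvert : List Char := (PySem.List.slice? pvAlphabet none none (-1)).getD []

def letter_sequence (t : String) : Bool :=
  let y := (PySem.Str.lower t).toList
  if (PySem.List.pyRange 0 ((y.length : Int) - 3) 1).any (fun i =>
       (PySem.List.pyRange 0 ((pvAlphabet.length : Int) - 3) 1).any (fun j =>
         PySem.List.slice y (some i) (some (i + 4)) ==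
           PySem.List.slice pvAlphabet (some j) (some (j + 4))))
  then true
  else
    (PySem.List.pyRange 0 ((y.length : Int) - 3) 1).any (fun i =>
      (PySem.List.pyRange 0 ((pvConvert.length : Int) - 3) 1).any (fun j =>
        PySem.List.slice y (some i) (some (i + 4)) ==
          PySem.List.slice pvConvert (some j) (some (j + 4))))

-- ===== PORT B =====
-- 'a' <= c <= 'z'
def pvIsLower (c : Char) : Bool := decide ('a' ≤ c) && decide (c ≤ 'z')

-- (ord(b) - ord(a)) % 26   (Python %: PySem.Int.mod)
def pvStep (p : Char × Char) : Int :=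
  PySem.Int.mod ((p.2.toNat : Int) - (p.1.toNat : Int)) 26

def letter_sequence_alt (t : String) : Bool :=
  let y := (PySem.Str.lower t).toList
  (PySem.List.pyRange 0 ((y.length : Int) - 3) 1).any (fun i =>
    let w := PySem.List.slice y (some i) (some (i + 4))
    w.all pvIsLower &&
      (let steps := (w.zip (PySem.List.slice w (some 1) none)).map pvStep
       steps == ([1, 1, 1] : List Int) || steps == ([25, 25, 25] : List Int)))

-- ===== PRECONDITION & SPEC =====
def Spec_letter_sequence (t : String) (out : Bool) : Prop := out = letter_sequence_alt t
instance (t : String) (out : Bool) : Decidable (Spec_letter_sequence t out) := by unfold Spec_letter_sequence; infer_instance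

-- ===== CLAIM (what is proved, stated in full; the proofs are below) =====
def Claim_equal_letter_sequence : Prop := ∀ (t : String), Dom_letter_sequence t → Spec_letter_sequence t (letter_sequence t)

-- ===== LEMMAS AND PROOFS =====

-- A's inner work for one window (forward pass || backward pass), and B's inner test
def pvAIn (w : List Char) : Bool :=
  ((PySem.List.pyRange 0 ((pvAlphabet.length : Int) - 3) 1).any (fun j =>
      w == PySem.List.slice pvAlphabet (some j) (some (j + 4)))
   || (PySem.List.pyRange 0 ((pvConvert.length : Int) - 3) 1).any (fun j =>
      w == PySem.List.slice pvConvert (some j) (some (j + 4))))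

def pvBIn (w : List Char) : Bool :=
  w.all pvIsLower &&
    ((w.zip (PySem.List.slice w (some 1) none)).map pvStep == ([1, 1, 1] : List Int)
      || (w.zip (PySem.List.slice w (some 1) none)).map pvStep == ([25, 25, 25] : List Int))

lemma pv_char_le_left (a : Char) : ('a' ≤ a) ↔ 97 ≤ a.toNat := by
  rw [Char.le_def, UInt32.le_iff_toNat_le]; rfl

lemma pv_char_le_right (a : Char) : (a ≤ 'z') ↔ a.toNat ≤ 122 := by
  rw [Char.le_def, UInt32.le_iff_toNat_le]; rfl

lemma pv_char_eq (a b : Char) : a = b ↔ a.toNat = b.toNat := by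
  constructor
  · rintro rfl; rfl
  · intro h; rw [← Char.ofNat_toNat a, ← Char.ofNat_toNat b, h]

lemma pvBIn_iff (a b c d : Char) : pvBIn [a,b,c,d] = true ↔
    ((97 ≤ a.toNat ∧ a.toNat ≤ 122) ∧ (97 ≤ b.toNat ∧ b.toNat ≤ 122) ∧
     (97 ≤ c.toNat ∧ c.toNat ≤ 122) ∧ (97 ≤ d.toNat ∧ d.toNat ≤ 122)) ∧
    ((((b.toNat:Int) - a.toNat) % 26 = 1 ∧ ((c.toNat:Int) - b.toNat) % 26 = 1 ∧
        ((d.toNat:Int) - c.toNat) % 26 = 1) ∨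
     (((b.toNat:Int) - a.toNat) % 26 = 25 ∧ ((c.toNat:Int) - b.toNat) % 26 = 25 ∧
        ((d.toNat:Int) - c.toNat) % 26 = 25)) := by
  simp [pvBIn, pvIsLower, pvStep, PySem.List.slice_from (a := 1) _ (by norm_num),
    pv_char_le_left, pv_char_le_right, and_assoc]

lemma pvAIn_iff (a b c d : Char) : pvAIn [a,b,c,d] = true ↔
    (∃ j : Int, (0 ≤ j ∧ j < 27) ∧ [a,b,c,d] = PySem.List.slice pvAlphabet (some j) (some (j+4))) ∨
    (∃ j : Int, (0 ≤ j ∧ j < 27) ∧ [a,b,c,d] = PySem.List.slice pvConvert (some j) (some (j+4))) := by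
  have h1 : ((pvAlphabet.length:Int) - 3) = 27 := by decide
  have h2 : ((pvConvert.length:Int) - 3) = 27 := by decide
  simp [pvAIn, h1, h2, List.any_eq_true, PySem.List.mem_pyRange_one, beq_iff_eq, and_assoc]

set_option maxHeartbeats 1000000 in
lemma pv_alpha_slice (j : Int) (h0 : 0 ≤ j) (h1 : j < 27) :
    PySem.List.slice pvAlphabet (some j) (some (j+4)) =
      [Char.ofNat (97 + j.toNat % 26), Char.ofNat (97 + (j.toNat+1) % 26),
       Char.ofNat (97 + (j.toNat+2) % 26), Char.ofNat (97 + (j.toNat+3) % 26)] := by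
  interval_cases j <;> decide

set_option maxHeartbeats 1000000 in
lemma pv_conv_slice (j : Int) (h0 : 0 ≤ j) (h1 : j < 27) :
    PySem.List.slice pvConvert (some j) (some (j+4)) =
      [Char.ofNat (97 + (29 - j.toNat) % 26), Char.ofNat (97 + (28 - j.toNat) % 26),
       Char.ofNat (97 + (27 - j.toNat) % 26), Char.ofNat (97 + (26 - j.toNat) % 26)] := by
  interval_cases j <;> decide

lemma pv_ofNat_toNat (k : Nat) (h : k < 26) : (Char.ofNat (97 + k)).toNat = 97 + k := by
  interval_cases k <;> decide

-- the heart: A's 54 table comparisons on one window equal B's arithmetic test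
lemma pv_window (a b c d : Char) : pvAIn [a, b, c, d] = pvBIn [a, b, c, d] := by
  rw [Bool.eq_iff_iff, pvAIn_iff, pvBIn_iff]
  constructor
  · rintro (⟨j, ⟨h0, h1⟩, hw⟩ | ⟨j, ⟨h0, h1⟩, hw⟩)
    · rw [pv_alpha_slice j h0 h1] at hw
      obtain ⟨ha, hb, hc, hd⟩ := by simpa only [List.cons.injEq, and_true] using hw
      rw [pv_char_eq] at ha hb hc hd
      rw [pv_ofNat_toNat _ (Nat.mod_lt _ (by norm_num))] at ha hb hc hd
      refine ⟨by omega, Or.inl ⟨?_, ?_, ?_⟩⟩ <;> omega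
    · rw [pv_conv_slice j h0 h1] at hw
      obtain ⟨ha, hb, hc, hd⟩ := by simpa only [List.cons.injEq, and_true] using hw
      rw [pv_char_eq] at ha hb hc hd
      rw [pv_ofNat_toNat _ (Nat.mod_lt _ (by norm_num))] at ha hb hc hd
      refine ⟨by omega, Or.inr ⟨?_, ?_, ?_⟩⟩ <;> omega
  · rintro ⟨⟨⟨ha1, ha2⟩, ⟨hb1, hb2⟩, ⟨hc1, hc2⟩, ⟨hd1, hd2⟩⟩, (⟨s1, s2, s3⟩ | ⟨s1, s2, s3⟩)⟩
    · refine Or.inl ⟨((a.toNat - 97 : Nat) : Int), ⟨by omega, by omega⟩, ?_⟩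
      rw [pv_alpha_slice _ (by omega) (by omega)]
      simp only [Int.toNat_natCast, List.cons.injEq, and_true]
      refine ⟨?_, ?_, ?_, ?_⟩ <;>
        (rw [pv_char_eq, pv_ofNat_toNat _ (Nat.mod_lt _ (by norm_num))]; omega)
    · refine Or.inr ⟨((((29 - (a.toNat - 97)) % 26 : Nat)) : Int), ⟨by omega, by omega⟩, ?_⟩
      rw [pv_conv_slice _ (by omega) (by omega)]
      simp only [Int.toNat_natCast, List.cons.injEq, and_true]
      refine ⟨?_, ?_, ?_, ?_⟩ <;>
        (rw [pv_char_eq, pv_ofNat_toNat _ (Nat.mod_lt _ (by norm_num))]; omega)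

-- every window both programs look at has exactly 4 characters
lemma pv_slice_window (y : List Char) (i : Int) (h0 : 0 ≤ i) (h4 : i + 4 ≤ (y.length : Int)) :
    ∃ a b c d, PySem.List.slice y (some i) (some (i + 4)) = [a, b, c, d] := by
  obtain ⟨n, rfl⟩ : ∃ n : Nat, i = (n : Int) := ⟨i.toNat, by omega⟩
  rw [show ((n : Int) + 4) = ((n + 4 : Nat) : Int) by push_cast; ring, PySem.List.slice_natCast]
  have hlen : 4 ≤ (y.drop n).length := by
    rw [List.length_drop]; omega
  rcases hl : y.drop n with _ | ⟨a, _ | ⟨b, _ | ⟨c, _ | ⟨d, rest⟩⟩⟩⟩ <;>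
      rw [hl] at hlen <;> simp at hlen ⊢

lemma pv_any_congr {α : Type} (l : List α) (p q : α → Bool) (h : ∀ x ∈ l, p x = q x) :
    l.any p = l.any q := by
  induction l with
  | nil => rfl
  | cons a l ih =>
    simp only [List.any_cons, h a List.mem_cons_self, ih fun x hx => h x (List.mem_cons_of_mem a hx)]

lemma pv_any_or {α : Type} (l : List α) (p q : α → Bool) :
    (l.any fun x => p x || q x) = (l.any p || l.any q) := by
  rw [Bool.eq_iff_iff]; simp only [List.any_eq_true, Bool.or_eq_true]
  constructor
  · rintro ⟨x, hx, h | h⟩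
    · exact Or.inl ⟨x, hx, h⟩
    · exact Or.inr ⟨x, hx, h⟩
  · rintro (⟨x, hx, h⟩ | ⟨x, hx, h⟩)
    · exact ⟨x, hx, Or.inl h⟩
    · exact ⟨x, hx, Or.inr h⟩

theorem letter_sequence_spec_aux (t : String) :
    letter_sequence t = letter_sequence_alt t := by
  unfold letter_sequence letter_sequence_alt
  simp only []
  generalize (PySem.Str.lower t).toList = y
  have hpt : ∀ i ∈ PySem.List.pyRange 0 ((y.length : Int) - 3) 1,
      (((PySem.List.pyRange 0 ((pvAlphabet.length : Int) - 3) 1).any (fun j =>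
          PySem.List.slice y (some i) (some (i + 4)) ==
            PySem.List.slice pvAlphabet (some j) (some (j + 4))))
        || ((PySem.List.pyRange 0 ((pvConvert.length : Int) - 3) 1).any (fun j =>
          PySem.List.slice y (some i) (some (i + 4)) ==
            PySem.List.slice pvConvert (some j) (some (j + 4)))))
      = ((PySem.List.slice y (some i) (some (i + 4))).all pvIsLower &&
          (((PySem.List.slice y (some i) (some (i + 4))).zip
              (PySem.List.slice (PySem.List.slice y (some i) (some (i + 4))) (some 1) none)).map pvStep
              == ([1, 1, 1] : List Int)
            || ((PySem.List.slice y (some i) (some (i + 4))).zip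
              (PySem.List.slice (PySem.List.slice y (some i) (some (i + 4))) (some 1) none)).map pvStep
              == ([25, 25, 25] : List Int))) := by
    intro i hi
    rw [PySem.List.mem_pyRange_one] at hi
    obtain ⟨a, b, c, d, hw⟩ := pv_slice_window y i hi.1 (by omega)
    rw [hw]
    have := pv_window a b c d
    unfold pvAIn pvBIn at this
    exact this
  rw [show ∀ (x z : Bool), (if x then true else z) = (x || z) from by decide, ← pv_any_or]
  exact pv_any_congr _ _ _ hpt

-- ===== VERDICT (by name: the statement is the Claim_ definition above) =====
theorem letter_sequence_spec : Claim_equal_letter_sequence := by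
  intro t _
  exact letter_sequence_spec_aux t
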